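-- pv_equiv track=rewrite | github.com/facebookresearch/searchformer | searchformer/utils.py | repeat_iterator
-- ===== SOURCE A (Python) =====
-- from typing import Any, Iterable, Iterator, List, Tuple
--
-- def repeat_iterator(it: Iterable[Any], n: int) -> Iterator[Any]:
--     """Repeats the provided iterator n times.
--
--     Args:
--         it (Iterable[Any]): Iterator that is to be repeated.
--         n (int): Number of repeats.
--
--     Yields:
--         Iterator[Any]: The repeated iterator.
--     """
--     step = 0
--     while step < n:
--         for element in it:
--             yield element
--             step += 1
--             if step >= n:
--                 break
-- ===== SOURCE B (Python) =====
-- def repeat_iterator(it, n):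
--     """Repeats the provided iterator n times (yields n elements cycling it)."""
--     elems = list(it)
--     k = len(elems)
--     for i in range(max(n, 0)):
--         yield elems[i % k]
-- ===== Notes on version B (the rewrite author's own statement) =====
-- stated objective: simpler
-- what changed: B materialises the iterable once and yields element i%len for i in range(max(n,0)) by modular indexing, replacing A's nested while/for restart loops with manual step counting and break.
import Mathlib
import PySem

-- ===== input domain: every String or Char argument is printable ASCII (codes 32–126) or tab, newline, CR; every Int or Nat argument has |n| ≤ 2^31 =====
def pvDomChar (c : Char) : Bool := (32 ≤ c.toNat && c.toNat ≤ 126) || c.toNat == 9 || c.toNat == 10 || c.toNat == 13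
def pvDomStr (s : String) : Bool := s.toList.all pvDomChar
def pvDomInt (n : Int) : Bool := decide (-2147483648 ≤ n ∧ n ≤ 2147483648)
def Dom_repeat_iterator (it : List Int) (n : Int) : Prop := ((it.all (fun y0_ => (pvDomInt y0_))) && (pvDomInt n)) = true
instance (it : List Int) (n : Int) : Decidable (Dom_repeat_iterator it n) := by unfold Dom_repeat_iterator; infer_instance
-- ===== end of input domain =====

-- B replaces A's nested restart loops (while over n with an inner for and manual break)
-- by a single range(max(n,0)) loop with modular indexing into the materialised list.


-- ===== PORT A =====
-- inner 'for element in it' loop: yield element, step += 1, break when step >= n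
def innerA (l : List Int) (n step : Int) (acc : List Int) : List Int × Int :=
  match l with
  | [] => (acc, step)
  | x :: xs =>
    let acc := acc ++ [x]
    let step := step + 1
    if step ≥ n then (acc, step) else innerA xs n step acc

-- used by outerA's decreasing_by (must precede it)
theorem innerA_snd_gt (l : List Int) (n step : Int) (acc : List Int)
    (hl : l ≠ []) (hs : step < n) : step < (innerA l n step acc).2 := by
  match l with
  | [] => exact absurd rfl hl
  | x :: xs =>
    simp only [innerA]
    split
    · omega
    · match xs with
      | [] => simp [innerA]
      | y :: ys =>
        have := innerA_snd_gt (y :: ys) n (step + 1) (acc ++ [x]) (by simp) (by omega)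
        omega

-- outer 'while step < n' loop; the 'it ≠ []' conjunct is a totality guard only:
-- Python A never terminates when it = [] and step < n (excluded by Pre_).
def outerA (it : List Int) (n step : Int) (acc : List Int) : List Int :=
  if h : step < n ∧ it ≠ [] then
    let p := innerA it n step acc
    outerA it n p.2 p.1
  else acc
termination_by (n - step).toNat
decreasing_by
  have := innerA_snd_gt it n step acc h.2 h.1
  omega

def repeat_iterator (it : List Int) (n : Int) : List Int :=
  outerA it n 0 []

-- ===== PORT B =====
-- elems = list(it); k = len(elems); for i in range(max(n,0)): yield elems[i % k]
-- (elems[i % k] ported as pyGetD with default 0; inside Pre_ the index is always in range)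
def repeat_iterator_alt (it : List Int) (n : Int) : List Int :=
  let elems := it
  let k : Int := elems.length
  (PySem.List.pyRange 0 (max n 0) 1).map (fun i => PySem.List.pyGetD elems (PySem.Int.mod i k) 0)

-- ===== PRECONDITION & SPEC =====
-- Pre_ excludes it = [] with n > 0: there Python A loops forever (and B raises ZeroDivisionError).
def Pre_repeat_iterator (it : List Int) (n : Int) : Prop := it ≠ [] ∨ n ≤ 0
instance (it : List Int) (n : Int) : Decidable (Pre_repeat_iterator it n) := by
  unfold Pre_repeat_iterator; infer_instance

def pvWitness_repeat_iterator : List Int × Int := ([1, 2, 3], 7)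

def Spec_repeat_iterator (it : List Int) (n : Int) (out : List Int) : Prop := out = repeat_iterator_alt it n
instance (it : List Int) (n : Int) (out : List Int) : Decidable (Spec_repeat_iterator it n out) := by unfold Spec_repeat_iterator; infer_instance

-- ===== CLAIM (what is proved, stated in full; the proofs are below) =====
def Claim_equal_repeat_iterator : Prop := ∀ (it : List Int) (n : Int), Dom_repeat_iterator it n → Pre_repeat_iterator it n → Spec_repeat_iterator it n (repeat_iterator it n)

-- ===== LEMMAS AND PROOFS =====

-- the cyclic prefix both programs compute
def Gfun (it : List Int) (m : Nat) : List Int :=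
  (List.range m).map (fun j => it.getD (j % it.length) 0)

theorem Gfun_small (it : List Int) (m : Nat) (h : m ≤ it.length) :
    Gfun it m = it.take m := by
  apply List.ext_getElem
  · simp [Gfun]; omega
  · intro i h1 h2
    simp only [List.length_take] at h2
    have hlt : i < it.length := by omega
    simp [Gfun, Nat.mod_eq_of_lt hlt, List.getD_eq_getElem?_getD,
      List.getElem?_eq_getElem hlt]

theorem Gfun_big (it : List Int) (m : Nat) (h : it.length ≤ m) :
    Gfun it m = it ++ Gfun it (m - it.length) := by
  have hm : m = it.length + (m - it.length) := by omega
  rw [Gfun, hm, List.range_add, List.map_append, List.map_map]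
  congr 1
  · rw [← Gfun]; rw [Gfun_small it it.length le_rfl, List.take_length]
  · simp [Gfun, Function.comp, Nat.add_mod_left]

theorem innerA_eq (l : List Int) (n step : Int) (acc : List Int) (hs : step < n) :
    innerA l n step acc =
      (acc ++ l.take (n - step).toNat, step + min l.length (n - step).toNat) := by
  induction l generalizing step acc with
  | nil => simp [innerA]
  | cons x xs ih =>
    simp only [innerA]
    have hm : (n - step).toNat = (n - (step + 1)).toNat + 1 := by omega
    split
    · have h1 : (n - step).toNat = 1 := by omega
      simp [h1]
    · rename_i hlt
      rw [ih (step + 1) (acc ++ [x]) (by omega)]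
      rw [hm]
      simp [List.take_succ_cons]
      omega

theorem outerA_eq (m : Nat) (it : List Int) (n step : Int) (acc : List Int)
    (hne : it ≠ []) (hs : step < n) (hm : (n - step).toNat = m) :
    outerA it n step acc = acc ++ Gfun it m := by
  induction m using Nat.strong_induction_on generalizing step acc with
  | _ m ih =>
    have hlen : 0 < it.length := List.length_pos_iff.mpr hne
    rw [outerA, dif_pos ⟨hs, hne⟩]
    rw [innerA_eq it n step acc hs, hm]
    by_cases hcase : m ≤ it.length
    · -- inner loop reaches n and breaks; outer guard fails afterwards
      have hmin : min it.length m = m := by omega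
      rw [outerA, dif_neg]
      · rw [Gfun_small it m hcase]
      · simp only [hmin]; omega
    · have hmin : min it.length m = it.length := by omega
      simp only [hmin]
      rw [ih (m - it.length) (by omega) (step + it.length) _
        (by omega) (by omega)]
      rw [List.take_of_length_le (by omega), List.append_assoc, ← Gfun_big it m (by omega)]

theorem alt_eq (it : List Int) (n : Int) (h : 0 < n) :
    repeat_iterator_alt it n = Gfun it n.toNat := by
  simp only [repeat_iterator_alt, PySem.List.pyRange_one, Gfun, List.map_map]
  have : ((max n 0) - 0).toNat = n.toNat := by omega
  rw [this]
  apply List.map_congr_left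
  intro j _
  show PySem.List.pyGetD it (PySem.Int.mod (0 + (j : Int)) (it.length : Int)) 0 = _
  rw [zero_add, PySem.Int.mod_natCast, PySem.List.pyGetD_natCast]

-- ===== VERDICT (by name: the statement is the Claim_ definition above) =====
theorem repeat_iterator_spec : Claim_equal_repeat_iterator := by
  intro it n _ hpre
  unfold Spec_repeat_iterator repeat_iterator
  by_cases hn : 0 < n
  · have hne : it ≠ [] := by
      rcases hpre with h | h
      · exact h
      · omega
    rw [outerA_eq n.toNat it n 0 [] hne hn (by omega), alt_eq it n hn]
    simp
  · rw [outerA, dif_neg (by omega)]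
    simp [repeat_iterator_alt, PySem.List.pyRange_one_eq_nil (by omega : max n 0 ≤ 0)]
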